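-- pv_equiv track=rewrite | github.com/zuzuka28/exersises_g-ib | fishing_sites/fishing_sites.py | homoglyph_change
-- ===== SOURCE A (Python) =====
-- def homoglyph_change(domen, fish=None, letter_index=0):
--     if fish is None:
--         fish = []
--
--     homoglyph = {'i': '1', 'l': '1', 'o': '0', 'a': '4', 'g': '9', 's': '5', 't': '7', 'z': '2'}
--
--     if letter_index == len(domen):
--         fish.append(domen)
--         return
--
--     letter_to_replace = domen[letter_index]
--
--     if letter_to_replace in homoglyph.keys():
--         replaced = domen[:letter_index] + homoglyph[letter_to_replace] + domen[letter_index + 1:]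
--         homoglyph_change(replaced, fish, letter_index + 1)
--
--         homoglyph_change(domen, fish, letter_index + 1)
--     else:
--         homoglyph_change(domen, fish, letter_index + 1)
--
--     return fish
-- ===== SOURCE B (Python) =====
-- def homoglyph_change(domen, fish=None, letter_index=0):
--     if fish is None:
--         fish = []
--
--     homoglyph = {'i': '1', 'l': '1', 'o': '0', 'a': '4', 'g': '9', 's': '5', 't': '7', 'z': '2'}
--
--     if letter_index == len(domen):
--         fish.append(domen)
--         return
--
--     prefix = domen[:letter_index]
--     # build all suffix variants back-to-front with an accumulator
--     tails = ['']
--     for c in reversed(domen[letter_index:]):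
--         options = [homoglyph[c], c] if c in homoglyph else [c]
--         tails = [o + t for o in options for t in tails]
--     for t in tails:
--         fish.append(prefix + t)
--     return fish
-- ===== Notes on version B (the rewrite author's own statement) =====
-- stated objective: alternative
-- what changed: Replaced A's branching recursion (one call per character, re-entering itself twice on homoglyph letters) by an iterative fold: all suffix variants are built back-to-front into an accumulator list and appended after the prefix in one pass.
-- outside the precondition, e.g. on homoglyph_change('ab', None, -1): A returns ['4b', 'ab'], B returns ['ab']
import Mathlib
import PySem

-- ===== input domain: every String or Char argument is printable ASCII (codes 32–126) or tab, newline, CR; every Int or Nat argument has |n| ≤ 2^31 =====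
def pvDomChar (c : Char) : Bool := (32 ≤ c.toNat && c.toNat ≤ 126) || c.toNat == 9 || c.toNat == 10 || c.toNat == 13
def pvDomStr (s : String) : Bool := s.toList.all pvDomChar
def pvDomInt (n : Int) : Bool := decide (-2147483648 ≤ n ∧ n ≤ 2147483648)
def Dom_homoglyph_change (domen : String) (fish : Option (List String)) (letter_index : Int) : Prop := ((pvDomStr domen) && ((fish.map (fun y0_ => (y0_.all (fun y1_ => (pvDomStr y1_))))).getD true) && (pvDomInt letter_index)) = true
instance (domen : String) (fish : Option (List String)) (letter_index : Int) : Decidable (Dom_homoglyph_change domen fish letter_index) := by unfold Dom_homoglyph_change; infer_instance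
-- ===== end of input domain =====

-- B replaces A's two-way branching recursion by one iterative back-to-front fold building all suffix
-- variants into an accumulator (objective: alternative decomposition). Both Pythons append the same
-- items in the same order to a caller-supplied `fish`; equivalence proved here is about the return value.

-- ===== PORT A =====
def pvHomoglyph : PySem.Dict Char Char :=
  PySem.Dict.ofList [('i','1'),('l','1'),('o','0'),('a','4'),('g','9'),('s','5'),('t','7'),('z','2')]

-- the recursion of A over (domen, fish, letter_index); fuel only makes it total (it never runs out
-- when started with (len - letter_index).toNat + 1 and 0 ≤ letter_index)
def pvGoA (domen : List Char) (fish : List String) (letter_index : Int) : Nat → List String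
  | 0 => fish
  | fuel + 1 =>
    if letter_index = (domen.length : Int) then fish ++ [String.ofList domen]
    else
      match PySem.List.pyGet? domen letter_index with
      | none => fish   -- Python raises IndexError here; excluded by Pre_
      | some letter_to_replace =>
        if pvHomoglyph.contains letter_to_replace then
          let replaced := PySem.List.slice domen none (some letter_index) ++
            [pvHomoglyph.getD letter_to_replace letter_to_replace] ++
            PySem.List.slice domen (some (letter_index + 1)) none
          pvGoA domen (pvGoA replaced fish (letter_index + 1) fuel) (letter_index + 1) fuel
        else
          pvGoA domen fish (letter_index + 1) fuel

def homoglyph_change (domen : String) (fish : Option (List String)) (letter_index : Int) : Option (List String) :=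
  let fish0 := fish.getD []
  let ds := domen.toList
  if letter_index = (ds.length : Int) then none   -- Python's bare `return` after fish.append(domen)
  else some (pvGoA ds fish0 letter_index (((ds.length : Int) - letter_index).toNat + 1))

-- ===== PORT B =====
-- all variants of the suffix, built back-to-front: fold from the right with accumulator `tails`
def pvTails (cs : List Char) : List (List Char) :=
  cs.foldr
    (fun c tails =>
      (if pvHomoglyph.contains c then [pvHomoglyph.getD c c, c] else [c]).flatMap
        (fun o => tails.map (fun t => o :: t)))
    [[]]

def homoglyph_change_alt (domen : String) (fish : Option (List String)) (letter_index : Int) : Option (List String) :=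
  let fish0 := fish.getD []
  let ds := domen.toList
  if letter_index = (ds.length : Int) then none
  else
    let pref := PySem.List.slice ds none (some letter_index)
    let tails := pvTails (PySem.List.slice ds (some letter_index) none)
    some (fish0 ++ tails.map (fun t => String.ofList (pref ++ t)))

-- ===== PRECONDITION & SPEC =====
-- Pre_ keeps letter_index in [0, len(domen)]: above len (or below -len) A raises IndexError, and a
-- negative in-range letter_index is outside the natural domain of this recursion parameter — there
-- A's negative-index wraparound re-processes suffix characters and returns an accidental value.
def Pre_homoglyph_change (domen : String) (fish : Option (List String)) (letter_index : Int) : Prop :=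
  0 ≤ letter_index ∧ letter_index ≤ (domen.toList.length : Int)
instance (domen : String) (fish : Option (List String)) (letter_index : Int) : Decidable (Pre_homoglyph_change domen fish letter_index) := by unfold Pre_homoglyph_change; infer_instance

def pvWitness_homoglyph_change : String × Option (List String) × Int := ("sit", none, 0)

def Spec_homoglyph_change (domen : String) (fish : Option (List String)) (letter_index : Int) (out : Option (List String)) : Prop := out = homoglyph_change_alt domen fish letter_index
instance (domen : String) (fish : Option (List String)) (letter_index : Int) (out : Option (List String)) : Decidable (Spec_homoglyph_change domen fish letter_index out) := by unfold Spec_homoglyph_change; infer_instance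

-- ===== CLAIM (what is proved, stated in full; the proofs are below) =====
def Claim_equal_homoglyph_change : Prop := ∀ (domen : String) (fish : Option (List String)) (letter_index : Int), Dom_homoglyph_change domen fish letter_index → Pre_homoglyph_change domen fish letter_index → Spec_homoglyph_change domen fish letter_index (homoglyph_change domen fish letter_index)
-- ===== LEMMAS AND PROOFS =====
-- core invariant: on a split pre ++ suf with letter_index = |pre| and fuel = |suf| + 1,
-- A's recursion appends exactly B's variants (prefix ++ each suffix tail), in B's order
theorem pvGoA_succ (domen : List Char) (fish : List String) (letter_index : Int) (fuel : Nat) :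
    pvGoA domen fish letter_index (fuel + 1)
      = if letter_index = (domen.length : Int) then fish ++ [String.ofList domen]
        else
          match PySem.List.pyGet? domen letter_index with
          | none => fish
          | some letter_to_replace =>
            if pvHomoglyph.contains letter_to_replace then
              pvGoA domen
                (pvGoA (PySem.List.slice domen none (some letter_index) ++
                    [pvHomoglyph.getD letter_to_replace letter_to_replace] ++
                    PySem.List.slice domen (some (letter_index + 1)) none)
                  fish (letter_index + 1) fuel)
                (letter_index + 1) fuel
            else pvGoA domen fish (letter_index + 1) fuel := rfl

-- core invariant: on a split pre ++ suf with letter_index = |pre| and fuel = |suf| + 1,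
-- A's recursion appends exactly B's variants (prefix ++ each suffix tail), in B's order
theorem pvGoA_eq_tails (suf : List Char) : ∀ (pre : List Char) (fish : List String),
    pvGoA (pre ++ suf) fish (pre.length : Int) (suf.length + 1)
      = fish ++ (pvTails suf).map (fun t => String.ofList (pre ++ t)) := by
  induction suf with
  | nil =>
    intro pre fish
    simp [pvGoA, pvTails]
  | cons c rest ih =>
    intro pre fish
    have hget : PySem.List.pyGet? (pre ++ c :: rest) (pre.length : Int) = some c := by
      rw [PySem.List.pyGet?_natCast]
      simp
    have hpre : PySem.List.slice (pre ++ c :: rest) none (some (pre.length : Int)) = pre := by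
      rw [PySem.List.slice_to_natCast]
      simp
    have hsuf : PySem.List.slice (pre ++ c :: rest) (some ((pre.length : Int) + 1)) none = rest := by
      have h : (pre.length : Int) + 1 = ((pre.length + 1 : Nat) : Int) := by push_cast; ring
      rw [h, PySem.List.slice_from_natCast]
      simp
    have hlen : ¬ ((pre.length : Int) = (((pre ++ c :: rest).length : Nat) : Int)) := by
      simp only [List.length_append, List.length_cons]
      push_cast
      omega
    have h1 : (pre.length : Int) + 1 = (((pre ++ [c]).length : Nat) : Int) := by simp
    have h1' : (pre.length : Int) + 1 = (((pre ++ [pvHomoglyph.getD c c]).length : Nat) : Int) := by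
      simp
    have h3 : pre ++ c :: rest = (pre ++ [c]) ++ rest := by simp
    have hlc : (c :: rest).length + 1 = (rest.length + 1) + 1 := rfl
    rw [hlc, pvGoA_succ, if_neg hlen, hget]
    by_cases hc : pvHomoglyph.contains c
    · simp only [hc, if_true, hpre, hsuf]
      rw [show pre ++ [pvHomoglyph.getD c c] ++ rest = (pre ++ [pvHomoglyph.getD c c]) ++ rest by simp,
        h1', ih]
      rw [show (((pre ++ [pvHomoglyph.getD c c]).length : Nat) : Int)
            = (((pre ++ [c]).length : Nat) : Int) by simp]
      rw [h3, ih]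
      simp [pvTails, hc, List.map_map, Function.comp_def]
    · simp only [hc, Bool.false_eq_true, if_false]
      rw [h1, h3, ih]
      simp [pvTails, hc, List.map_map, Function.comp_def]

-- ===== VERDICT (by name: the statement is the Claim_ definition above) =====
theorem homoglyph_change_spec : Claim_equal_homoglyph_change := by
  intro domen fish letter_index _ hpre
  obtain ⟨h0, hle⟩ := hpre
  unfold Spec_homoglyph_change homoglyph_change homoglyph_change_alt
  by_cases heq : letter_index = (domen.toList.length : Int)
  · simp [heq]
  · simp only [heq, if_false]
    have hlt : letter_index < (domen.toList.length : Int) := lt_of_le_of_ne hle heq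
    set ds := domen.toList with hds
    have hsplit : ds = ds.take letter_index.toNat ++ ds.drop letter_index.toNat := by
      simp
    have hlenpre : ((ds.take letter_index.toNat).length : Int) = letter_index := by
      simp; omega
    have hfuel : ((ds.length : Int) - letter_index).toNat + 1 = (ds.drop letter_index.toNat).length + 1 := by
      simp; omega
    have hkey := pvGoA_eq_tails (ds.drop letter_index.toNat) (ds.take letter_index.toNat)
      (fish.getD [])
    rw [hlenpre] at hkey
    have hA : pvGoA ds (fish.getD []) letter_index
        (((ds.length : Int) - letter_index).toNat + 1)
        = (fish.getD [])
          ++ (pvTails (ds.drop letter_index.toNat)).map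
              (fun t => String.ofList (ds.take letter_index.toNat ++ t)) := by
      rw [hfuel]
      calc pvGoA ds (fish.getD []) letter_index ((ds.drop letter_index.toNat).length + 1)
          = pvGoA (ds.take letter_index.toNat ++ ds.drop letter_index.toNat)
              (fish.getD []) letter_index
              ((ds.drop letter_index.toNat).length + 1) := by rw [← hsplit]
        _ = _ := hkey
    rw [hA, PySem.List.slice_to ds h0, PySem.List.slice_from ds h0]
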